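-- pv_equiv track=rewrite | github.com/lustigj-code/fx-option | services/execution/orders.py | allocate_ladder
-- ===== SOURCE A (Python) =====
-- from typing import List, Optional
--
-- def allocate_ladder(quantity: int, ladder_depth: int) -> List[int]:
--     """Split the quantity evenly across the laddered expiries."""
--
--     base = quantity // ladder_depth
--     remainder = quantity % ladder_depth
--
--     allocations = []
--     for idx in range(ladder_depth):
--         leg_qty = base + (1 if idx < remainder else 0)
--         allocations.append(leg_qty)
--     return allocations
-- ===== SOURCE B (Python) =====
-- def allocate_ladder(quantity: int, ladder_depth: int):
--     """Split the quantity evenly across the laddered expiries."""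
--     allocations = []
--     remaining = quantity
--     legs = ladder_depth
--     while legs > 0:
--         leg = -(-remaining // legs)  # ceil: give this leg its fair share of what's left
--         allocations.append(leg)
--         remaining -= leg
--         legs -= 1
--     return allocations
-- ===== Notes on version B (the rewrite author's own statement) =====
-- stated objective: alternative
-- what changed: Replaces A's precomputed base/remainder plus index-vs-remainder test with a greedy single pass: each leg takes the ceiling of remaining quantity over remaining legs, then both are decremented; no remainder comparison ever happens.
import Mathlib
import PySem

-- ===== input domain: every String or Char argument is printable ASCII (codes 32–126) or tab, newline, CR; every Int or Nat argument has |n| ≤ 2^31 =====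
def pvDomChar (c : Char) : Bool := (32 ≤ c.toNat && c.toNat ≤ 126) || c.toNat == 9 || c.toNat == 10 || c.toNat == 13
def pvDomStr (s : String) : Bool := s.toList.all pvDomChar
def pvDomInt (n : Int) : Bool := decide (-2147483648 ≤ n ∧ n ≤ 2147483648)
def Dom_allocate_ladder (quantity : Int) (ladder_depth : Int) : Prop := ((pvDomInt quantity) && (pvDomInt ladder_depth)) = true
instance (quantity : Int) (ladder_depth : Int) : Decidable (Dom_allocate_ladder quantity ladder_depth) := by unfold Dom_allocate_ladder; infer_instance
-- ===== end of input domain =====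

-- B replaces A's precomputed base/remainder-and-index-test loop by a greedy pass:
-- each leg takes ceil(remaining / legs_left); objective: alternative algorithm, same cost.

-- ===== PORT A =====
def allocate_ladder (quantity : Int) (ladder_depth : Int) : List Int :=
  let base := PySem.Int.floordiv quantity ladder_depth
  let remainder := PySem.Int.mod quantity ladder_depth
  (PySem.List.pyRange 0 ladder_depth 1).foldl
    (fun allocations idx =>
      allocations ++ [base + (if idx < remainder then 1 else 0)]) []

-- ===== PORT B =====
-- B's while loop, as recursion on the (nonnegative) number of remaining legs;
-- legs ≤ 0 means the loop body never runs, i.e. fuel legs.toNat = 0.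
def allocLoop (remaining : Int) : Nat → List Int
  | 0 => []
  | n + 1 =>
    let leg := -(PySem.Int.floordiv (-remaining) ((n : Int) + 1))
    leg :: allocLoop (remaining - leg) n

def allocate_ladder_alt (quantity : Int) (ladder_depth : Int) : List Int :=
  allocLoop quantity ladder_depth.toNat

-- ===== PRECONDITION & SPEC =====
-- A raises ZeroDivisionError when ladder_depth = 0; excluded.
def Pre_allocate_ladder (quantity : Int) (ladder_depth : Int) : Prop := ladder_depth ≠ 0
instance (quantity : Int) (ladder_depth : Int) : Decidable (Pre_allocate_ladder quantity ladder_depth) := by unfold Pre_allocate_ladder; infer_instance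
def pvWitness_allocate_ladder : Int × Int := (10, 3)

def Spec_allocate_ladder (quantity : Int) (ladder_depth : Int) (out : List Int) : Prop := out = allocate_ladder_alt quantity ladder_depth
instance (quantity : Int) (ladder_depth : Int) (out : List Int) : Decidable (Spec_allocate_ladder quantity ladder_depth out) := by unfold Spec_allocate_ladder; infer_instance

-- ===== CLAIM (what is proved, stated in full; the proofs are below) =====
def Claim_equal_allocate_ladder : Prop := ∀ (quantity : Int) (ladder_depth : Int), Dom_allocate_ladder quantity ladder_depth → Pre_allocate_ladder quantity ladder_depth → Spec_allocate_ladder quantity ladder_depth (allocate_ladder quantity ladder_depth)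

-- ===== LEMMAS AND PROOFS =====

-- a map over range(a, b) whose value is constant on the range is a replicate
lemma map_pyRange_const (f : Int → Int) (a b v : Int)
    (h : ∀ x, a ≤ x → x < b → f x = v) :
    (PySem.List.pyRange a b 1).map f = List.replicate (b - a).toNat v := by
  rw [List.eq_replicate_iff]
  refine ⟨by simp [PySem.List.length_pyRange_one], ?_⟩
  intro y hy
  simp only [List.mem_map] at hy
  obtain ⟨x, hx, rfl⟩ := hy
  rw [PySem.List.mem_pyRange_one] at hx
  exact h x hx.1 hx.2

-- B's greedy loop produces exactly the base/remainder block decomposition.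
lemma allocLoop_eq (n : Nat) : ∀ q : Int, 0 < n →
    allocLoop q n =
      List.replicate (PySem.Int.mod q n).toNat (PySem.Int.floordiv q n + 1) ++
        List.replicate (n - (PySem.Int.mod q n).toNat) (PySem.Int.floordiv q n) := by
  induction n with
  | zero => intro q h; omega
  | succ m ih =>
    intro q _
    set b := PySem.Int.floordiv q (m + 1 : Nat) with hb
    set r := PySem.Int.mod q (m + 1 : Nat) with hr
    have hpos : (0 : Int) < (m + 1 : Nat) := by positivity
    have hqr : b * (m + 1 : Nat) + r = q := PySem.Int.floordiv_mul_add_mod q _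
    have hr0 : 0 ≤ r := PySem.Int.mod_nonneg q hpos
    have hrlt : r < (m + 1 : Nat) := PySem.Int.mod_lt q hpos
    have hleg : -(PySem.Int.floordiv (-q) ((m : Int) + 1)) = b + (if r = 0 then 0 else 1) := by
      rw [PySem.Int.neg_floordiv_neg_eq_iff_of_pos (by push_cast at hpos ⊢; omega)]
      by_cases h0 : r = 0
      · rw [if_pos h0]
        push_cast at hqr hpos ⊢
        constructor <;> nlinarith
      · rw [if_neg h0]
        have hr1 : (1:ℤ) ≤ r := by omega
        push_cast at hqr hrlt hpos ⊢
        constructor <;> nlinarith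
    unfold allocLoop
    simp only [hleg]
    by_cases h0 : r = 0
    · rw [if_pos h0, add_zero]
      rcases Nat.eq_zero_or_pos m with hm | hm
      · subst hm; simp [allocLoop, h0]
      · have hq' : q - b = b * m := by push_cast at hqr; nlinarith [hqr]
        have hb' : PySem.Int.floordiv (q - b) m = b := by
          rw [PySem.Int.floordiv_eq_iff_of_pos (by exact_mod_cast hm), hq']
          push_cast; constructor <;> nlinarith [show (0:ℤ) < (m:ℤ) from by exact_mod_cast hm]
        have hr' : PySem.Int.mod (q - b) m = 0 := by
          have h := PySem.Int.floordiv_mul_add_mod (q - b) (m : Int)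
          rw [hb'] at h; linarith [hq']
        rw [ih (q - b) hm, hb', hr']
        simp [h0, List.replicate_succ]
    · rw [if_neg h0]
      have hm : 0 < m := by omega
      have hq' : q - (b + 1) = b * m + (r - 1) := by push_cast at hqr; nlinarith [hqr]
      have hb' : PySem.Int.floordiv (q - (b + 1)) m = b := by
        rw [PySem.Int.floordiv_eq_iff_of_pos (by exact_mod_cast hm), hq']
        have hr1 : (1:ℤ) ≤ r := by omega
        have hrlt' : r < (m:ℤ) + 1 := by exact_mod_cast hrlt
        constructor <;> nlinarith [show (0:ℤ) < (m:ℤ) from by exact_mod_cast hm]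
      have hr' : PySem.Int.mod (q - (b + 1)) m = r - 1 := by
        have h := PySem.Int.floordiv_mul_add_mod (q - (b + 1)) (m : Int)
        rw [hb'] at h; linarith [hq']
      rw [ih (q - (b + 1)) hm, hb', hr']
      rw [show r.toNat = (r - 1).toNat + 1 from by omega, List.replicate_succ,
        show m + 1 - ((r - 1).toNat + 1) = m - (r - 1).toNat from by omega]
      simp

-- ===== VERDICT (by name: the statement is the Claim_ definition above) =====
theorem allocate_ladder_spec : Claim_equal_allocate_ladder := by
  intro q d _ hd
  unfold Spec_allocate_ladder allocate_ladder allocate_ladder_alt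
  simp only []
  rw [PySem.List.foldl_append_singleton_eq_map, List.nil_append]
  rcases lt_or_gt_of_ne hd with hneg | hpos
  · -- ladder_depth < 0: the loop runs zero times on both sides
    rw [PySem.List.pyRange_one_eq_nil (by omega)]
    have : d.toNat = 0 := by omega
    simp [this, allocLoop]
  · -- ladder_depth > 0
    have hd' : ((d.toNat : Int)) = d := Int.toNat_of_nonneg (le_of_lt hpos)
    rw [allocLoop_eq d.toNat q (by omega), hd']
    have h0r := PySem.Int.mod_nonneg q hpos
    have hrd := PySem.Int.mod_lt q hpos
    set b := PySem.Int.floordiv q d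
    set r := PySem.Int.mod q d
    rw [PySem.List.pyRange_one_append 0 r d h0r (le_of_lt hrd), List.map_append]
    congr 1
    · rw [map_pyRange_const _ _ _ (b + 1) (fun x _ hx => by simp [hx])]
      norm_num
    · rw [map_pyRange_const _ _ _ b (fun x hx _ => by simp [not_lt.mpr hx])]
      congr 1
      omega
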